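-- pv_equiv track=rewrite | github.com/raj713335/LeetCode | Easy/3856 Trim Trailing Vowels.py | trimTrailingVowels
-- ===== SOURCE A (Python) =====
-- def trimTrailingVowels(s: str) -> str:
--
--     s = list(s)[::-1]
--
--     for i in range(0, len(s)):
--         if s[i] in ["a", "e", "i", "o", "u"]:
--             s[i] = ""
--             continue
--         else:
--             break
--
--     return "".join(s[::-1])
-- ===== SOURCE B (Python) =====
-- def trimTrailingVowels(s: str) -> str:
--     i = len(s)
--     while i > 0 and s[i-1] in "aeiou":
--         i -= 1
--     return s[:i]
-- ===== Notes on version B (the rewrite author's own statement) =====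
-- stated objective: simpler
-- what changed: B replaces A's double reversal and per-character list mutation/join with a single backward index scan followed by one slice s[:i].
import Mathlib
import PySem

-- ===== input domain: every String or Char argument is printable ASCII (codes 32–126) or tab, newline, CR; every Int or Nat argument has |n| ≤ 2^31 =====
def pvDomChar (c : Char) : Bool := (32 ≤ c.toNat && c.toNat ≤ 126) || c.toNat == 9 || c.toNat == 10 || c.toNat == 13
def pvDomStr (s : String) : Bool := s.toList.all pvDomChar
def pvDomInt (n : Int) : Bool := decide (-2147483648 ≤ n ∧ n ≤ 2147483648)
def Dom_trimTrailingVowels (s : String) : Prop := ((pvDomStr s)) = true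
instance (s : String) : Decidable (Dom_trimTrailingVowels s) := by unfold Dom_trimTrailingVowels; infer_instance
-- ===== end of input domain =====

-- B replaces A's double reversal and per-character list mutation/join with a backward index scan and one slice (simpler).

-- ===== PORT A =====
-- the for-loop with break: blank out leading (of the reversed list) vowels, stop at the first non-vowel
def trimAGo : List String → List String
  | [] => []
  | c :: rest =>
      if c ∈ (["a", "e", "i", "o", "u"] : List String) then "" :: trimAGo rest
      else c :: rest

def trimTrailingVowels (s : String) : String :=
  -- s = list(s)[::-1]
  let l : List String := (((PySem.List.slice? s.toList none none (-1)).getD []).map (fun c => String.ofList [c]))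
  let l' := trimAGo l
  -- "".join(s[::-1])
  PySem.Str.join "" ((PySem.List.slice? l' none none (-1)).getD [])

-- ===== PORT B =====
-- while i > 0 and s[i-1] in "aeiou": i -= 1   (recursion on i)
def trimBGo (cs : List Char) : Nat → Nat
  | 0 => 0
  | j + 1 => if (cs[j]?).any (fun c => PySem.Str.isIn (String.ofList [c]) "aeiou") then trimBGo cs j else j + 1

def trimTrailingVowels_alt (s : String) : String :=
  -- return s[:i]
  PySem.Str.slice s none (some (trimBGo s.toList s.toList.length))

-- ===== PRECONDITION & SPEC =====
def Spec_trimTrailingVowels (s : String) (out : String) : Prop := out = trimTrailingVowels_alt s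
instance (s : String) (out : String) : Decidable (Spec_trimTrailingVowels s out) := by unfold Spec_trimTrailingVowels; infer_instance

-- ===== CLAIM (what is proved, stated in full; the proofs are below) =====
def Claim_equal_trimTrailingVowels : Prop := ∀ (s : String), Dom_trimTrailingVowels s → Spec_trimTrailingVowels s (trimTrailingVowels s)

-- ===== LEMMAS AND PROOFS =====

def isVowel (c : Char) : Bool := c == 'a' || c == 'e' || c == 'i' || c == 'o' || c == 'u'

lemma memVowelStrings (c : Char) :
    (String.ofList [c] ∈ (["a", "e", "i", "o", "u"] : List String)) ↔ isVowel c = true := by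
  constructor
  · intro h
    simp only [List.mem_cons, List.not_mem_nil, or_false] at h
    rcases h with h | h | h | h | h <;>
      (have := congrArg String.toList h; simp at this; simp [isVowel, this])
  · intro h
    simp only [isVowel, Bool.or_eq_true, beq_iff_eq] at h
    rcases h with ((((rfl|rfl)|rfl)|rfl)|rfl) <;> simp

lemma isIn_vowels (c : Char) :
    PySem.Str.isIn (String.ofList [c]) "aeiou" = isVowel c := by
  rw [Bool.eq_iff_iff, PySem.Str.isIn_iff_infix]
  have htl : (String.ofList [c]).toList = [c] := by simp
  have h2 : ("aeiou" : String).toList = ['a', 'e', 'i', 'o', 'u'] := by decide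
  rw [htl, h2]
  constructor
  · rintro ⟨pre, suf, h⟩
    have hm : c ∈ (['a', 'e', 'i', 'o', 'u'] : List Char) := by rw [← h]; simp
    simp only [List.mem_cons, List.not_mem_nil, or_false] at hm
    rcases hm with rfl | rfl | rfl | rfl | rfl <;> simp [isVowel]
  · intro h
    simp only [isVowel, Bool.or_eq_true, beq_iff_eq] at h
    rcases h with ((((rfl | rfl) | rfl) | rfl) | rfl)
    · exact ⟨[], ['e','i','o','u'], rfl⟩
    · exact ⟨['a'], ['i','o','u'], rfl⟩
    · exact ⟨['a','e'], ['o','u'], rfl⟩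
    · exact ⟨['a','e','i'], ['u'], rfl⟩
    · exact ⟨['a','e','i','o'], [], rfl⟩

lemma trimAGo_map (l : List Char) :
    trimAGo (l.map (fun c => String.ofList [c]))
      = (l.takeWhile isVowel).map (fun _ => "") ++ (l.dropWhile isVowel).map (fun c => String.ofList [c]) := by
  induction l with
  | nil => rfl
  | cons c t ih =>
    simp only [List.map_cons, trimAGo, List.takeWhile_cons, List.dropWhile_cons]
    by_cases h : isVowel c = true
    · rw [if_pos ((memVowelStrings c).mpr h)]; simp [h, ih]
    · rw [if_neg (fun hm => h ((memVowelStrings c).mp hm))]; simp [h]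

lemma join_empty_sep (L : List (List Char)) : PySem.Chars.join [] L = L.flatten := by
  induction L with
  | nil => rfl
  | cons h t ih =>
    cases t with
    | nil => simp [PySem.Chars.join, List.intercalate]
    | cons h2 t2 => rw [PySem.Chars.join_cons_cons, ih]; simp

lemma flatten_rev_singletons (X : List Char) :
    ((X.map (fun c => [c])).reverse).flatten = X.reverse := by
  rw [← List.map_reverse]
  generalize X.reverse = Y
  induction Y with
  | nil => rfl
  | cons h t ih => simp [ih]

lemma flatten_rev_empty (X : List Char) :
    ((X.map (fun _ => ([] : List Char))).reverse).flatten = [] := by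
  simp

lemma trimBGo_eq (cs : List Char) (i : Nat) (h : i ≤ cs.length) :
    trimBGo cs i = ((cs.take i).reverse.dropWhile isVowel).length := by
  induction i with
  | zero => simp [trimBGo]
  | succ j ih =>
    have hj : j < cs.length := by omega
    have hget : cs[j]? = some cs[j] := List.getElem?_eq_getElem hj
    have htake : (cs.take (j + 1)).reverse = cs[j] :: (cs.take j).reverse := by
      rw [List.take_add_one, hget]; simp
    rw [htake]
    simp only [trimBGo, hget, Option.any_some, isIn_vowels, List.dropWhile_cons]
    by_cases hv : isVowel cs[j] = true
    · simp [hv, ih (by omega)]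
    · simp only [hv]
      have : (cs.take (j + 1)).reverse.length = j + 1 := by
        simp; omega
      rw [htake] at this
      simp at this ⊢
      omega

-- ===== VERDICT (by name: the statement is the Claim_ definition above) =====
theorem trimTrailingVowels_spec : Claim_equal_trimTrailingVowels := by
  intro s _
  unfold Spec_trimTrailingVowels trimTrailingVowels trimTrailingVowels_alt
  apply String.toList_inj.mp
  set cs := s.toList with hcs
  set rv := cs.reverse with hrv
  rw [PySem.List.slice?_none_none_neg_one]
  simp only [Option.getD_some, ← hrv, trimAGo_map]
  rw [PySem.List.slice?_none_none_neg_one]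
  simp only [Option.getD_some]
  rw [trimBGo_eq cs cs.length (le_refl _), List.take_length]
  have hLHS : (PySem.Str.join ""
      (((rv.takeWhile isVowel).map (fun _ => "") ++ (rv.dropWhile isVowel).map (fun c => String.ofList [c])).reverse)).toList
      = (rv.dropWhile isVowel).reverse := by
    rw [PySem.Str.toList_join]
    simp only [List.map_reverse, List.map_append, List.map_map, Function.comp_def,
      String.toList_ofList, show ("" : String).toList = ([] : List Char) from rfl]
    rw [join_empty_sep, List.reverse_append, List.flatten_append, flatten_rev_singletons,
      flatten_rev_empty, List.append_nil]
  rw [hLHS]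
  have hslice : (PySem.Str.slice s none (some ((rv.dropWhile isVowel).length : Nat))).toList
      = cs.take (rv.dropWhile isVowel).length := by
    rw [PySem.Str.toList_slice]
    simp only [PySem.Chars.slice_eq_listSlice, PySem.List.slice_to_natCast]
    rfl
  rw [hslice]
  have hsplit : cs = (rv.dropWhile isVowel).reverse ++ (rv.takeWhile isVowel).reverse := by
    conv_lhs => rw [← List.reverse_reverse cs]
    rw [← hrv, ← List.takeWhile_append_dropWhile (p := isVowel) (l := rv)]
    simp
  conv_rhs => rw [hsplit]
  rw [List.take_left' (by simp)]
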